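-- pv_equiv track=rewrite | github.com/jasveen18/CP-krle-placement-lag-jayegi | AlgoExpert/03 Sorting Algorithms/0 app.py | heapifyList
-- ===== SOURCE A (Python) =====
-- def heapifyList(nums, n, idx):
--     comparisonsHere = 0
--     largestIdx = idx
--
--     left = 2*idx + 1
--     right = 2*idx + 2
--
--     if left < n and nums[idx] < nums[left]:
--         largestIdx = left
--     if right < n and nums[largestIdx] < nums[right]:
--         largestIdx = right
--
--     if largestIdx != idx:
--         comparisonsHere += 1
--         nums[idx], nums[largestIdx] = nums[largestIdx], nums[idx]
--         comparisonsHere += heapifyList(nums, n, largestIdx)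
--
--     return comparisonsHere
-- ===== SOURCE B (Python) =====
-- def heapifyList(nums, n, idx):
--     # Hole-based sift-down: lift nums[idx] out, slide larger children up into
--     # the hole (one write per level instead of a swap), drop the value back in.
--     if 2 * idx + 1 >= n:
--         return 0
--     v = nums[idx]
--     moves = 0
--     while True:
--         left = 2 * idx + 1
--         right = 2 * idx + 2
--         largest, big = idx, v
--         if left < n and v < nums[left]:
--             largest, big = left, nums[left]
--         if right < n and big < nums[right]:
--             largest, big = right, nums[right]
--         if largest == idx:
--             break
--         nums[idx] = big
--         idx = largest
--         moves += 1
--     nums[idx] = v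
--     return moves
-- ===== Notes on version B (the rewrite author's own statement) =====
-- stated objective: alternative
-- what changed: Replaces A's recursive swap-based sift-down by the hole-based iterative sift-down: the value at idx is lifted out once, larger children slide up into the hole (one list write per level instead of a swap), and the value is written back at the end; a move counter replaces the summed recursive results.
-- outside the precondition, e.g. on heapifyList([5, 1, 2], 4, 0): A returns 0, B returns 0; on heapifyList([3, 5], 1, -1): A returns 0, B returns 0
import Mathlib
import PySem

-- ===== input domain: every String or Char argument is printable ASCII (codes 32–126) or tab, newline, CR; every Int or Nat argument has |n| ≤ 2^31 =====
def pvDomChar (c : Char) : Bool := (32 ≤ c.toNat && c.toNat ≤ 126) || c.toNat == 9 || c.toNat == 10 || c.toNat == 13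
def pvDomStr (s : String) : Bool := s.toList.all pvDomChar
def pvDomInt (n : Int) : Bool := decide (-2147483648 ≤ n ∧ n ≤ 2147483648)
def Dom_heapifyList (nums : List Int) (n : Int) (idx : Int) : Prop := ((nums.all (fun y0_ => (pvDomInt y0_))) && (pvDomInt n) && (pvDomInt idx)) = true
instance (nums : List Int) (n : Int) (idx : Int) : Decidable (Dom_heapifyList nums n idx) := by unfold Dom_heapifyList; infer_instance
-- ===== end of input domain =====

-- B replaces A's recursive swap-based sift-down by the hole-based iterative sift-down
-- (the value at idx is lifted out once, larger children slide up, one write per level).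
-- Both A and B mutate the caller's list to the same final list; the equivalence proved
-- here is about the RETURN value only.

-- ===== PORT A =====
-- swap nums[i], nums[j] (in-range under Pre_; pySetD is the total form of Python item assignment)
def pvSwap (nums : List Int) (i j : Int) : List Int :=
  let a := PySem.List.pyGetD nums i 0
  let b := PySem.List.pyGetD nums j 0
  PySem.List.pySetD (PySem.List.pySetD nums i b) j a

-- A's recursion, fuel-bounded (fuel n.toNat+1 suffices on Pre_: largestIdx strictly
-- increases and stays below n). Returns (comparisonsHere, mutated list).
def heapifyAux (fuel : Nat) (nums : List Int) (n : Int) (idx : Int) : Int × List Int :=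
  match fuel with
  | 0 => (0, nums)
  | fuel + 1 =>
    let largestIdx := idx
    let left := 2 * idx + 1
    let right := 2 * idx + 2
    let largestIdx := if left < n ∧ PySem.List.pyGetD nums idx 0 < PySem.List.pyGetD nums left 0 then left else largestIdx
    let largestIdx := if right < n ∧ PySem.List.pyGetD nums largestIdx 0 < PySem.List.pyGetD nums right 0 then right else largestIdx
    if largestIdx ≠ idx then
      let nums' := pvSwap nums idx largestIdx
      let rec_ := heapifyAux fuel nums' n largestIdx
      (1 + rec_.1, rec_.2)
    else (0, nums)

def heapifyList (nums : List Int) (n : Int) (idx : Int) : Int :=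
  (heapifyAux (n.toNat + 1) nums n idx).1

-- ===== PORT B =====
-- B's 'while True' loop: the hole sits at idx, v is the lifted-out value; each step
-- writes only the winning child into the hole. State (nums, idx, moves); v is constant.
def siftDown (fuel : Nat) (nums : List Int) (n : Int) (idx : Int) (v : Int) (moves : Int) : Int :=
  match fuel with
  | 0 => moves
  | fuel + 1 =>
    let left := 2 * idx + 1
    let right := 2 * idx + 2
    let lb : Int × Int :=
      if left < n ∧ v < PySem.List.pyGetD nums left 0 then (left, PySem.List.pyGetD nums left 0)
      else (idx, v)
    let lb : Int × Int :=
      if right < n ∧ lb.2 < PySem.List.pyGetD nums right 0 then (right, PySem.List.pyGetD nums right 0)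
      else lb
    if lb.1 = idx then moves
    else siftDown fuel (PySem.List.pySetD nums idx lb.2) n lb.1 v (moves + 1)

def heapifyList_alt (nums : List Int) (n : Int) (idx : Int) : Int :=
  if 2 * idx + 1 ≥ n then 0
  else siftDown (n.toNat + 1) nums n idx (PySem.List.pyGetD nums idx 0) 0

-- ===== PRECONDITION & SPEC =====
-- Pre_ restricts to the natural sift-down domain (0 ≤ idx and heap size n within the list);
-- the disjunct keeps the trivial no-child case n ≤ 2*idx+1, where A touches nothing and returns 0.
-- Outside Pre_ A in general raises IndexError (child index ≥ len(nums)) or reads via Python's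
-- negative-index wraparound; on the excluded inputs where A still happens to return, B returns
-- the same value in Python (see cites), but they lie outside this file's claim.
def Pre_heapifyList (nums : List Int) (n : Int) (idx : Int) : Prop :=
  (0 ≤ idx ∧ 0 ≤ n ∧ n ≤ nums.length) ∨ n ≤ 2 * idx + 1
instance (nums : List Int) (n : Int) (idx : Int) : Decidable (Pre_heapifyList nums n idx) := by
  unfold Pre_heapifyList; infer_instance
def pvWitness_heapifyList : List Int × Int × Int := ([3, 7, 2, 1, 9], 5, 0)

def Spec_heapifyList (nums : List Int) (n : Int) (idx : Int) (out : Int) : Prop := out = heapifyList_alt nums n idx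
instance (nums : List Int) (n : Int) (idx : Int) (out : Int) : Decidable (Spec_heapifyList nums n idx out) := by unfold Spec_heapifyList; infer_instance

-- ===== CLAIM (what is proved, stated in full; the proofs are below) =====
def Claim_equal_heapifyList : Prop := ∀ (nums : List Int) (n : Int) (idx : Int), Dom_heapifyList nums n idx → Pre_heapifyList nums n idx → Spec_heapifyList nums n idx (heapifyList nums n idx)

-- ===== LEMMAS AND PROOFS =====

-- reads through pyGetD at nonneg indices, after a set at a different nonneg index
theorem pyGetD_set_ne (xs : List Int) (i : Nat) (j : Int) (v d : Int)
    (hj : 0 ≤ j) (hne : (i : Int) ≠ j) :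
    PySem.List.pyGetD (xs.set i v) j d = PySem.List.pyGetD xs j d := by
  rw [PySem.List.pyGetD, PySem.List.pyGetD,
      PySem.List.pyGet?_of_nonneg _ hj, PySem.List.pyGet?_of_nonneg _ hj,
      List.getElem?_set_ne (by omega)]

theorem pyGetD_set_self (xs : List Int) (i : Nat) (v d : Int) (h : i < xs.length) :
    PySem.List.pyGetD (xs.set i v) (i : Int) d = v := by
  rw [PySem.List.pyGetD, PySem.List.pyGet?_natCast, List.getElem?_set_self h]
  rfl

-- invariant: B's loop state (nums, idx, v) corresponds to A's list 'nums.set idx v'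
-- (the hole at idx filled with the lifted-out value); B's counter accumulates exactly
-- A's summed comparison count.
theorem siftDown_eq (fuel : Nat) :
    ∀ (nums : List Int) (n idx v moves : Int),
      0 ≤ idx → idx < n → n ≤ (nums.length : Int) →
      siftDown fuel nums n idx v moves
        = moves + (heapifyAux fuel (PySem.List.pySetD nums idx v) n idx).1 := by
  induction fuel with
  | zero => intro nums n idx v moves _ _ _; simp [siftDown, heapifyAux]
  | succ fuel ih =>
    intro nums n idx v moves h0 h1 h2
    have hlen : idx.toNat < nums.length := by omega
    have hset : PySem.List.pySetD nums idx v = nums.set idx.toNat v :=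
      PySem.List.pySetD_of_nonneg _ _ h0
    have hv : PySem.List.pyGetD (nums.set idx.toNat v) idx 0 = v := by
      have := pyGetD_set_self nums idx.toNat v 0 hlen
      rwa [Int.toNat_of_nonneg h0] at this
    have hl : PySem.List.pyGetD (nums.set idx.toNat v) (2*idx+1) 0
        = PySem.List.pyGetD nums (2*idx+1) 0 :=
      pyGetD_set_ne nums idx.toNat _ v 0 (by omega) (by omega)
    have hr : PySem.List.pyGetD (nums.set idx.toNat v) (2*idx+2) 0
        = PySem.List.pyGetD nums (2*idx+2) 0 :=
      pyGetD_set_ne nums idx.toNat _ v 0 (by omega) (by omega)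
    have step : ∀ big : Int, ∀ largest : Int, 0 ≤ largest → largest < n → largest ≠ idx →
        siftDown fuel (PySem.List.pySetD nums idx big) n largest v (moves + 1)
          = moves + (1 + (heapifyAux fuel
              (PySem.List.pySetD (PySem.List.pySetD (nums.set idx.toNat v) idx big)
                largest v) n largest).1) := by
      intro big largest hg0 hg1 hg2
      have hy : PySem.List.pySetD nums idx big = nums.set idx.toNat big :=
        PySem.List.pySetD_of_nonneg _ _ h0
      have hz : PySem.List.pySetD (nums.set idx.toNat v) idx big = nums.set idx.toNat big := by
        rw [PySem.List.pySetD_of_nonneg _ _ h0, List.set_set]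
      rw [hy, hz, ih (nums.set idx.toNat big) n largest v (moves+1) hg0 hg1 (by simp; omega)]
      ring
    simp only [siftDown, heapifyAux, hset, hv, hl, hr]
    by_cases c1 : 2*idx+1 < n ∧ v < PySem.List.pyGetD nums (2*idx+1) 0
    · simp only [if_pos c1, hl]
      by_cases c2 : 2*idx+2 < n ∧
          PySem.List.pyGetD nums (2*idx+1) 0 < PySem.List.pyGetD nums (2*idx+2) 0
      · simp only [if_pos c2]
        rw [if_neg (show ¬ (2*idx+2 = idx) by omega),
            if_pos (show (2*idx+2 : Int) ≠ idx by omega)]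
        simp only [pvSwap, hv, hr]
        exact step _ _ (by omega) (by omega) (by omega)
      · simp only [if_neg c2]
        rw [if_neg (show ¬ (2*idx+1 = idx) by omega),
            if_pos (show (2*idx+1 : Int) ≠ idx by omega)]
        simp only [pvSwap, hv, hl]
        exact step _ _ (by omega) (by omega) (by omega)
    · simp only [if_neg c1, hv]
      by_cases c2 : 2*idx+2 < n ∧ v < PySem.List.pyGetD nums (2*idx+2) 0
      · simp only [if_pos c2]
        rw [if_neg (show ¬ (2*idx+2 = idx) by omega),
            if_pos (show (2*idx+2 : Int) ≠ idx by omega)]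
        simp only [pvSwap, hv, hr]
        exact step _ _ (by omega) (by omega) (by omega)
      · simp only [if_neg c2]
        simp only [if_true, if_neg (show ¬ ((idx : Int) ≠ idx) by omega)]
        ring

-- ===== VERDICT (by name: the statement is the Claim_ definition above) =====
theorem heapifyList_spec : Claim_equal_heapifyList := by
  intro nums n idx _ hpre
  unfold Spec_heapifyList heapifyList heapifyList_alt
  by_cases hg : 2 * idx + 1 ≥ n
  · rw [if_pos hg]
    have c1 : ¬ (2*idx+1 < n ∧ PySem.List.pyGetD nums idx 0 < PySem.List.pyGetD nums (2*idx+1) 0) :=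
      fun h => absurd h.1 (by omega)
    have c2 : ¬ (2*idx+2 < n ∧ PySem.List.pyGetD nums idx 0 < PySem.List.pyGetD nums (2*idx+2) 0) :=
      fun h => absurd h.1 (by omega)
    simp only [heapifyAux, if_neg c1, if_neg c2, if_neg (by omega : ¬ (idx ≠ idx))]
  · rw [if_neg hg]
    push Not at hg
    have h0 : 0 ≤ idx := by
      rcases hpre with ⟨h, _, _⟩ | h
      · exact h
      · omega
    have hlt : idx < n := by omega
    have hlen : n ≤ (nums.length : Int) := by
      rcases hpre with ⟨_, _, h⟩ | h
      · exact_mod_cast h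
      · omega
    rw [siftDown_eq _ nums n idx _ 0 h0 hlt hlen]
    have : PySem.List.pySetD nums idx (PySem.List.pyGetD nums idx 0) = nums := by
      rw [PySem.List.pySetD_of_nonneg _ _ h0,
          PySem.List.pyGetD_eq_getElem nums 0 h0 (by omega), List.set_getElem_self]
    rw [this]
    ring
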